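-- pv_equiv track=rewrite | github.com/mariajosefrancolugo/osp | osp/interventions/views.py | newline_to_br
-- ===== SOURCE A (Python) =====
-- def newline_to_br(text):
--     return_text = ''
--     for char in text:
--         if char == '\n':
--             return_text = return_text + '<br>'
--         else:
--             return_text = return_text + char
--     return return_text
-- ===== SOURCE B (Python) =====
-- def newline_to_br(text):
--     return '<br>'.join(text.split('\n'))
-- ===== Notes on version B (the rewrite author's own statement) =====
-- stated objective: faster
-- what changed: Replaces the per-character loop with quadratic string concatenation by a single split on the newline character followed by one join with the break tag.
import Mathlib
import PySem

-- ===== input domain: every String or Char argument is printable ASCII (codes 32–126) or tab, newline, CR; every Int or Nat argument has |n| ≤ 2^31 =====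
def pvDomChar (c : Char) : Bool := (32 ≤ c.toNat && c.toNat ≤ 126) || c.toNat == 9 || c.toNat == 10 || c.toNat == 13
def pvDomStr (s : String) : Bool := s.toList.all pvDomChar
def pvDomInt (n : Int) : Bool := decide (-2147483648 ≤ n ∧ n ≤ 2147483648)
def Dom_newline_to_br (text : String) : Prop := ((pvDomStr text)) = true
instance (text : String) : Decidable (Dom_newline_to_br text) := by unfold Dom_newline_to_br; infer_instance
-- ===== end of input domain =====

-- B replaces A's per-character accumulation loop with split on newline + join with the break tag (measured faster: avoids repeated string concatenation).

-- ===== PORT A =====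
-- character loop with a string accumulator, as in A
def newline_to_br (text : String) : String :=
  String.ofList (text.toList.foldl
    (fun acc c => if c = '\n' then acc ++ "<br>".toList else acc ++ [c]) [])

-- ===== PORT B =====
-- '<br>'.join(text.split('\n')): split on the (nonempty) separator, then join
def newline_to_br_alt (text : String) : String :=
  String.ofList (PySem.Chars.join "<br>".toList (PySem.Chars.splitOn text.toList ['\n']))

-- ===== PRECONDITION & SPEC =====
def Spec_newline_to_br (text : String) (out : String) : Prop := out = newline_to_br_alt text
instance (text : String) (out : String) : Decidable (Spec_newline_to_br text out) := by unfold Spec_newline_to_br; infer_instance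

-- ===== CLAIM (what is proved, stated in full; the proofs are below) =====
def Claim_equal_newline_to_br : Prop := ∀ (text : String), Dom_newline_to_br text → Spec_newline_to_br text (newline_to_br text)

-- ===== LEMMAS AND PROOFS =====

-- the replacement of every '\n' in l by "<br>", as one flat list
def pvRep (l : List Char) : List Char :=
  (l.map (fun c => if c = '\n' then "<br>".toList else [c])).flatten

theorem pvFoldl_eq_rep (l : List Char) (a : List Char) :
    l.foldl (fun acc c => if c = '\n' then acc ++ "<br>".toList else acc ++ [c]) a
      = a ++ pvRep l := by
  induction l generalizing a with
  | nil => simp [pvRep]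
  | cons c rest ih =>
      simp only [List.foldl_cons, pvRep, List.map_cons, List.flatten_cons, ih]
      split_ifs <;> simp

theorem pvJoin_append_singleton (sep : List Char) (xs : List (List Char)) (y : List Char) :
    PySem.Chars.join sep (xs ++ [y])
      = PySem.Chars.join sep xs ++ (if xs = [] then [] else sep) ++ y := by
  induction xs with
  | nil => simp [PySem.Chars.join_nil, PySem.Chars.join_singleton]
  | cons x xs ih =>
      cases xs with
      | nil => simp [PySem.Chars.join_singleton, PySem.Chars.join_cons_cons]
      | cons z zs =>
          simp only [List.cons_append, PySem.Chars.join_cons_cons]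
          rw [show z :: (zs ++ [y]) = (z :: zs) ++ [y] from rfl, ih]
          simp [List.append_assoc]

theorem pvGo_spec (fuel : Nat) :
    ∀ (l cur acc : List Char) (accs : List (List Char)), l.length ≤ fuel →
    PySem.Chars.join "<br>".toList (PySem.Chars.splitOn.go ['\n'] fuel l (cur ++ acc.reverse) accs)
      = PySem.Chars.join "<br>".toList accs.reverse
          ++ (if accs = [] then [] else "<br>".toList)
          ++ acc ++ cur.reverse ++ pvRep l := by
  induction fuel with
  | zero =>
      intro l cur acc accs h
      have hl : l = [] := List.length_eq_zero_iff.mp (Nat.le_zero.mp h)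
      subst hl
      simp [PySem.Chars.splitOn.go, pvRep, pvJoin_append_singleton]
  | succ f ih =>
      intro l cur acc accs h
      cases l with
      | nil =>
          simp [PySem.Chars.splitOn.go, pvRep, pvJoin_append_singleton]
      | cons c rest =>
          by_cases hc : c = '\n'
          · subst hc
            have hpre : List.isPrefixOf ['\n'] ('\n' :: rest) = true := by
              simp [List.isPrefixOf]
            have := ih rest [] [] ((cur ++ acc.reverse).reverse :: accs) (by
              simpa using Nat.le_of_succ_le_succ h)
            simp only [List.reverse_nil, List.append_nil] at this
            simp only [PySem.Chars.splitOn.go, hpre, if_pos, List.length_cons, List.length_nil,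
              List.drop_succ_cons, List.drop_zero]
            rw [this]
            simp [pvRep, pvJoin_append_singleton, List.append_assoc]
          · have hpre : List.isPrefixOf ['\n'] (c :: rest) = false := by
              simp only [List.isPrefixOf, Bool.and_true, beq_eq_false_iff_ne,
                ne_eq]
              exact fun h => hc h.symm
            have := ih rest (c :: cur) acc accs (by
              simpa using Nat.le_of_succ_le_succ h)
            simp only [PySem.Chars.splitOn.go, hpre, Bool.false_eq_true, if_false,
              ← List.cons_append]
            rw [this]
            simp [pvRep, hc, List.append_assoc]

theorem pvJoin_splitOn (l : List Char) :
    PySem.Chars.join "<br>".toList (PySem.Chars.splitOn l ['\n']) = pvRep l := by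
  have := pvGo_spec (l.length + 1) l [] [] [] (Nat.le_succ _)
  simpa [PySem.Chars.splitOn, PySem.Chars.join_nil] using this

-- ===== VERDICT (by name: the statement is the Claim_ definition above) =====
theorem newline_to_br_spec : Claim_equal_newline_to_br := by
  intro text _
  unfold Spec_newline_to_br newline_to_br newline_to_br_alt
  rw [pvFoldl_eq_rep, pvJoin_splitOn]
  simp
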